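-- pv_equiv track=rewrite | github.com/Kubiuks/Alife | Alife/stat.py | differences_between_experiments
-- ===== SOURCE A (Python) =====
-- def differences_between_experiments(experiments_split):
--     it = iter(experiments_split)
--     the_len = len(next(it))
--     if not all(len(l) == the_len for l in it):
--         raise ValueError('incorrect experiment name, please use: WorldCondition_Bonds_DSImode!')
--     values = zip(*experiments_split)
--     result_list = list(values)
--     tmp_differences = []
--     for e in result_list:
--         l = list(e)
--         tmp_differences.append(not all(x == l[0] for x in l))
--     return tmp_differences
-- ===== SOURCE B (Python) =====
-- def differences_between_experiments(experiments_split):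
--     it = iter(experiments_split)
--     the_len = len(next(it))
--     if not all(len(l) == the_len for l in it):
--         raise ValueError('incorrect experiment name, please use: WorldCondition_Bonds_DSImode!')
--     first = experiments_split[0]
--     all_equal = [True] * the_len
--     for experiment in experiments_split:
--         for j in range(the_len):
--             all_equal[j] = all_equal[j] and (experiment[j] == first[j])
--     return [not e for e in all_equal]
-- ===== Notes on version B (the rewrite author's own statement) =====
-- stated objective: alternative
-- what changed: replaces the zip(*...) transpose plus a per-column scan with a single row-major pass that keeps a running boolean array all_equal[j] &= (row[j] == first[j]), then negates it
import Mathlib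
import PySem

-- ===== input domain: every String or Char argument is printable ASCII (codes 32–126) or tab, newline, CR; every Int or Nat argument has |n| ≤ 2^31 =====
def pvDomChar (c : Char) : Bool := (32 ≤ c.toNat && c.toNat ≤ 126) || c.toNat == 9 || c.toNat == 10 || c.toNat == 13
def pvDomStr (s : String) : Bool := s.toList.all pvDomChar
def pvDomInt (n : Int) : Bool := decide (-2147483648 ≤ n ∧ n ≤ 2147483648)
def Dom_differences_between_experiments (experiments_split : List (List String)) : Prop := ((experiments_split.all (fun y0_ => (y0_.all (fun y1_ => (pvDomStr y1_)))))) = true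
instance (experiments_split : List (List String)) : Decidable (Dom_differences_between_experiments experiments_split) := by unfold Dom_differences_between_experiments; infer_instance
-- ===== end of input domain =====

-- B replaces the zip(*...) transpose + per-column scan with one row-major pass over a
-- running boolean array; objective: alternative (same cost, different traversal).


-- ===== PORT A =====
-- zip(*rows): repeatedly take the heads as a column until some row runs out (zip truncates).
def pyZip (ls : List (List String)) : List (List String) :=
  if _h9 : ls.isEmpty || ls.any (·.isEmpty) then []
  else (ls.map (fun r => r.headD "")) :: pyZip (ls.map (fun r => r.tail))
termination_by (ls.headD []).length
decreasing_by
  simp only [Bool.or_eq_true, List.isEmpty_iff, List.any_eq_true, not_or, not_exists] at _h9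
  obtain ⟨h1, h2⟩ := _h9
  cases ls with
  | nil => exact absurd rfl h1
  | cons r rs =>
    have hr : r ≠ [] := fun he => h2 r ⟨List.mem_cons_self, he⟩
    simp only [List.headD_cons]
    cases r with
    | nil => exact absurd rfl hr
    | cons a as => simp

-- Literal port of A. Python raises on empty input (StopIteration) and on a length
-- mismatch (ValueError); both are excluded by Pre_, the port returns [] there.
def differences_between_experiments (experiments_split : List (List String)) : List Bool :=
  match experiments_split with
  | [] => []  -- next(it) raises StopIteration: outside Pre_
  | first :: rest =>
    let the_len := first.length
    if ¬ (rest.all (fun l => l.length == the_len)) then []  -- raise ValueError: outside Pre_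
    else
      (pyZip (first :: rest)).map (fun l => !(l.all (fun x => x == l.headD "")))

-- ===== PORT B =====
-- all_equal[j] = all_equal[j] and (row[j] == first[j]), done pointwise over the three lists.
def updRow : List Bool → List String → List String → List Bool
  | b :: bs, x :: xs, f :: fs => (b && (x == f)) :: updRow bs xs fs
  | _, _, _ => []

def differences_between_experiments_alt (experiments_split : List (List String)) : List Bool :=
  match experiments_split with
  | [] => []  -- next(it) raises StopIteration: outside Pre_
  | first :: rest =>
    let the_len := first.length
    if ¬ (rest.all (fun l => l.length == the_len)) then []  -- raise ValueError: outside Pre_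
    else
      ((first :: rest).foldl (fun acc row => updRow acc row first)
        (List.replicate the_len true)).map (fun e => !e)

-- ===== PRECONDITION & SPEC =====
-- Pre_ excludes exactly the inputs where A raises: the empty list (StopIteration from
-- next(it)) and ragged inputs (the explicit ValueError).
def Pre_differences_between_experiments (experiments_split : List (List String)) : Prop :=
  experiments_split ≠ [] ∧
    ∀ l ∈ experiments_split, l.length = (experiments_split.headD []).length

instance (experiments_split : List (List String)) : Decidable (Pre_differences_between_experiments experiments_split) := by unfold Pre_differences_between_experiments; infer_instance

def pvWitness_differences_between_experiments : List (List String) :=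
  [["a", "b"], ["a", "c"]]

def Spec_differences_between_experiments (experiments_split : List (List String)) (out : List Bool) : Prop := out = differences_between_experiments_alt experiments_split
instance (experiments_split : List (List String)) (out : List Bool) : Decidable (Spec_differences_between_experiments experiments_split out) := by unfold Spec_differences_between_experiments; infer_instance

-- ===== CLAIM (what is proved, stated in full; the proofs are below) =====
def Claim_equal_differences_between_experiments : Prop := ∀ (experiments_split : List (List String)), Dom_differences_between_experiments experiments_split → Pre_differences_between_experiments experiments_split → Spec_differences_between_experiments experiments_split (differences_between_experiments experiments_split)

-- ===== LEMMAS AND PROOFS =====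

-- pyZip of a nonempty rectangular matrix is the list of its n columns.
theorem pyZip_char (n : Nat) : ∀ (es : List (List String)), es ≠ [] →
    (∀ r ∈ es, r.length = n) →
    pyZip es = (List.range n).map (fun j => es.map (fun r => r.getD j "")) := by
  induction n with
  | zero =>
    intro es hne hlen
    rw [pyZip]
    have : es.any (·.isEmpty) = true := by
      cases es with
      | nil => exact absurd rfl hne
      | cons r rs =>
        have := hlen r List.mem_cons_self
        simp [List.any_cons, List.eq_nil_of_length_eq_zero this]
    simp [this]
  | succ n ih =>
    intro es hne hlen
    have hnonnil : ∀ r ∈ es, r ≠ [] := by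
      intro r hr h
      have := hlen r hr
      simp [h] at this
    rw [pyZip]
    have hcond : (es.isEmpty || es.any (·.isEmpty)) = false := by
      simp only [Bool.or_eq_false_iff, List.any_eq_false]
      constructor
      · simpa using hne
      · intro r hr
        simpa using hnonnil r hr
    rw [dif_neg (by simp [hcond])]
    have ihe := ih (es.map (fun r => r.tail))
      (by simpa using hne)
      (by intro r hr
          simp only [List.mem_map] at hr
          obtain ⟨r0, hr0, rfl⟩ := hr
          have := hlen r0 hr0
          simp [List.length_tail, this])
    rw [ihe, List.range_succ_eq_map, List.map_cons, List.map_map]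
    congr 1
    · apply List.map_congr_left
      intro r hr
      have hrne := hnonnil r hr
      cases r with
      | nil => exact absurd rfl hrne
      | cons a as => simp
    · apply List.map_congr_left
      intro j _
      simp only [Function.comp, List.map_map]
      apply List.map_congr_left
      intro r hr
      have hrne := hnonnil r hr
      cases r with
      | nil => exact absurd rfl hrne
      | cons a as => simp [Nat.succ_eq_add_one]

-- one row-major update, pointwise over the columns
theorem updRow_char (n : Nat) : ∀ (g : Nat → Bool) (row fst : List String),
    row.length = n → fst.length = n →
    updRow ((List.range n).map g) row fst =
      (List.range n).map (fun j => g j && (row.getD j "" == fst.getD j "")) := by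
  induction n with
  | zero => intro g row fst _ _; simp [updRow]
  | succ n ih =>
    intro g row fst hrow hfst
    cases row with
    | nil => simp at hrow
    | cons x xs =>
      cases fst with
      | nil => simp at hfst
      | cons f fs =>
        rw [List.range_succ_eq_map, List.map_cons, List.map_cons, List.map_map, List.map_map]
        simp only [updRow]
        congr 1
        rw [ih (g ∘ Nat.succ) xs fs (by simpa using hrow) (by simpa using hfst)]
        apply List.map_congr_left
        intro j _
        simp [Function.comp]

-- the whole fold, pointwise over the columns
theorem foldl_updRow_char (n : Nat) (fst : List String) (hfst : fst.length = n) :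
    ∀ (es : List (List String)) (g : Nat → Bool), (∀ r ∈ es, r.length = n) →
    es.foldl (fun acc row => updRow acc row fst) ((List.range n).map g) =
      (List.range n).map (fun j =>
        es.foldl (fun b r => b && (r.getD j "" == fst.getD j "")) (g j)) := by
  intro es
  induction es with
  | nil => intro g _; simp
  | cons r rs ih =>
    intro g hlen
    simp only [List.foldl_cons]
    rw [updRow_char n g r fst (hlen r List.mem_cons_self) hfst,
      ih _ (fun r' hr' => hlen r' (List.mem_cons_of_mem _ hr'))]

theorem foldl_and_eq (p : List String → Bool) :
    ∀ (l : List (List String)) (b : Bool),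
      l.foldl (fun b r => b && p r) b = (b && l.all p) := by
  intro l
  induction l with
  | nil => intro b; simp
  | cons x xs ih => intro b; simp [List.foldl_cons, ih, Bool.and_assoc]

theorem replicate_true_eq (n : Nat) :
    List.replicate n true = (List.range n).map (fun _ => true) := by
  simp

-- ===== VERDICT (by name: the statement is the Claim_ definition above) =====
theorem differences_between_experiments_spec : Claim_equal_differences_between_experiments := by
  intro es _ hpre
  obtain ⟨hne, hlen⟩ := hpre
  unfold Spec_differences_between_experiments
  cases es with
  | nil => exact absurd rfl hne
  | cons first rest =>
    have hlen' : ∀ r ∈ first :: rest, r.length = first.length := by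
      simpa using hlen
    unfold differences_between_experiments differences_between_experiments_alt
    simp only
    split_ifs with hguard
    · rw [pyZip_char first.length (first :: rest) (by simp) hlen',
        replicate_true_eq,
        foldl_updRow_char first.length first rfl (first :: rest) (fun _ => true) hlen',
        List.map_map, List.map_map]
      apply List.map_congr_left
      intro j _
      simp only [Function.comp]
      rw [foldl_and_eq (fun r => r.getD j "" == first.getD j "")]
      simp [List.all_map, Function.comp_def]
    · rfl
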